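-- pv_equiv track=rewrite | github.com/dariusz-nowak/GameKeySeller | getInformation/ggDeals/ggDealsCheckGames.py | sortGamesInList
-- ===== SOURCE A (Python) =====
-- def sortGamesInList(gamesList):
--     sortedGamesList = {
--         'new' : [],
--         'expensive' : [],
--         'cheaper' : [],
--         'deleted' : [],
--     }
--
--     for game in gamesList:
--         if game['status'] == 'new': sortedGamesList['new'].append(game)
--         elif game['status'] == 'expensive': sortedGamesList['expensive'].append(game)
--         elif game['status'] == 'cheaper': sortedGamesList['cheaper'].append(game)
--         elif game['status'] == 'deleted': sortedGamesList['deleted'].append(game)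
--
--     return sortedGamesList
-- ===== SOURCE B (Python) =====
-- def sortGamesInList(gamesList):
--     return {
--         'new': [g for g in gamesList if g['status'] == 'new'],
--         'expensive': [g for g in gamesList if g['status'] == 'expensive'],
--         'cheaper': [g for g in gamesList if g['status'] == 'cheaper'],
--         'deleted': [g for g in gamesList if g['status'] == 'deleted'],
--     }
-- ===== Notes on version B (the rewrite author's own statement) =====
-- stated objective: idiomatic
-- what changed: Replaces the single mutating bucketing pass over a pre-built dict with a dict literal of four independent list-comprehension filters, one scan per status.
import Mathlib
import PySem

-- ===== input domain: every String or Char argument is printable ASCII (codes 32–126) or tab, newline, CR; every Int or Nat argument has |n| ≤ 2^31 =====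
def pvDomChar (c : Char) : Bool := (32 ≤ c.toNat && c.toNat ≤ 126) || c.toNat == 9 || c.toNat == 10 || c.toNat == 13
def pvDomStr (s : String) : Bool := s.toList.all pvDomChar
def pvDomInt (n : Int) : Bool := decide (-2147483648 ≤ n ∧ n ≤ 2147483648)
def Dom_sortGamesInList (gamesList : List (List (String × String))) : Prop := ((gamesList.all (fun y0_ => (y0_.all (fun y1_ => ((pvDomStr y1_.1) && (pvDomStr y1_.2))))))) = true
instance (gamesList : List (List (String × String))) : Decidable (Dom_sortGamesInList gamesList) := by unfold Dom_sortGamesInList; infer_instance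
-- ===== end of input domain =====

-- B is a dict literal of four independent filters instead of A's single mutating bucketing pass; same O(n) cost, more idiomatic.

-- game['status']: first-match lookup in the association list (KeyError = none; defaulted to "",
-- reachable only outside Pre_sortGamesInList)
def pvStatus (game : List (String × String)) : String :=
  (((game.find? (fun kv => kv.1 == "status")).map (fun kv => kv.2)).getD "")

-- ===== PORT A =====
def sortGamesInList (gamesList : List (List (String × String))) : List (String × List (List (String × String))) :=
  let sorted0 : PySem.Dict String (List (List (String × String))) :=
    PySem.Dict.mk [("new", []), ("expensive", []), ("cheaper", []), ("deleted", [])]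
  let sorted := gamesList.foldl (fun d game =>
    if pvStatus game == "new" then d.modify "new" [] (fun l => l ++ [game])
    else if pvStatus game == "expensive" then d.modify "expensive" [] (fun l => l ++ [game])
    else if pvStatus game == "cheaper" then d.modify "cheaper" [] (fun l => l ++ [game])
    else if pvStatus game == "deleted" then d.modify "deleted" [] (fun l => l ++ [game])
    else d) sorted0
  sorted.items

-- ===== PORT B =====
def sortGamesInList_alt (gamesList : List (List (String × String))) : List (String × List (List (String × String))) :=
  [("new", gamesList.filter (fun g => pvStatus g == "new")),
   ("expensive", gamesList.filter (fun g => pvStatus g == "expensive")),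
   ("cheaper", gamesList.filter (fun g => pvStatus g == "cheaper")),
   ("deleted", gamesList.filter (fun g => pvStatus g == "deleted"))]

-- ===== PRECONDITION & SPEC =====
-- Pre_ excludes exactly the inputs on which Python A raises KeyError: a game with no 'status' key.
def Pre_sortGamesInList (gamesList : List (List (String × String))) : Prop :=
  gamesList.all (fun g => g.any (fun kv => kv.1 == "status")) = true
instance (gamesList : List (List (String × String))) : Decidable (Pre_sortGamesInList gamesList) := by
  unfold Pre_sortGamesInList; infer_instance
def pvWitness_sortGamesInList : (List (List (String × String))) :=
  [[("status", "new"), ("id", "1")], [("status", "gone")], [("status", "cheaper")]]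

def Spec_sortGamesInList (gamesList : List (List (String × String))) (out : List (String × List (List (String × String)))) : Prop := out = sortGamesInList_alt gamesList
instance (gamesList : List (List (String × String))) (out : List (String × List (List (String × String)))) : Decidable (Spec_sortGamesInList gamesList out) := by unfold Spec_sortGamesInList; infer_instance

-- ===== CLAIM (what is proved, stated in full; the proofs are below) =====
def Claim_equal_sortGamesInList : Prop := ∀ (gamesList : List (List (String × String))), Dom_sortGamesInList gamesList → Pre_sortGamesInList gamesList → Spec_sortGamesInList gamesList (sortGamesInList gamesList)

-- ===== LEMMAS AND PROOFS =====

-- Loop invariant: A's fold over a dict with the four fixed keys keeps the shape and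
-- appends exactly the games each filter keeps.
lemma sortGames_loop (l : List (List (String × String)))
    (a b c d : List (List (String × String))) :
    l.foldl (fun d game =>
      if pvStatus game == "new" then d.modify "new" [] (fun l => l ++ [game])
      else if pvStatus game == "expensive" then d.modify "expensive" [] (fun l => l ++ [game])
      else if pvStatus game == "cheaper" then d.modify "cheaper" [] (fun l => l ++ [game])
      else if pvStatus game == "deleted" then d.modify "deleted" [] (fun l => l ++ [game])
      else d)
      (PySem.Dict.mk [("new", a), ("expensive", b), ("cheaper", c), ("deleted", d)])
    = PySem.Dict.mk [("new", a ++ l.filter (fun g => pvStatus g == "new")),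
        ("expensive", b ++ l.filter (fun g => pvStatus g == "expensive")),
        ("cheaper", c ++ l.filter (fun g => pvStatus g == "cheaper")),
        ("deleted", d ++ l.filter (fun g => pvStatus g == "deleted"))] := by
  induction l generalizing a b c d with
  | nil => simp
  | cons g t ih =>
    simp only [List.foldl_cons, List.filter_cons]
    by_cases h1 : pvStatus g == "new"
    · rw [if_pos h1]
      refine (ih (a ++ [g]) b c d).trans ?_
      simp [eq_of_beq h1]
    · by_cases h2 : pvStatus g == "expensive"
      · rw [if_neg h1, if_pos h2]
        refine (ih a (b ++ [g]) c d).trans ?_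
        simp [eq_of_beq h2]
      · by_cases h3 : pvStatus g == "cheaper"
        · rw [if_neg h1, if_neg h2, if_pos h3]
          refine (ih a b (c ++ [g]) d).trans ?_
          simp [eq_of_beq h3]
        · by_cases h4 : pvStatus g == "deleted"
          · rw [if_neg h1, if_neg h2, if_neg h3, if_pos h4]
            refine (ih a b c (d ++ [g])).trans ?_
            simp [eq_of_beq h4]
          · rw [if_neg h1, if_neg h2, if_neg h3, if_neg h4]
            refine (ih a b c d).trans ?_
            simp [h1, h2, h3, h4]

-- ===== VERDICT (by name: the statement is the Claim_ definition above) =====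
theorem sortGamesInList_spec : Claim_equal_sortGamesInList := by
  intro gamesList _ _
  show _ = _
  simp only [sortGamesInList, sortGamesInList_alt, sortGames_loop]
  simp
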